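-- pv_equiv track=rewrite | github.com/Kuhron/flexpy | flexpy/Bible/AnalyzeVerses.py | elements_match
-- ===== SOURCE A (Python) =====
-- def elements_match(test_element, pattern_element, expansions):
--     if pattern_element == "_":
--         return True
--     elif test_element == pattern_element:
--         return True
--     elif pattern_element in expansions:
--         possibilities = expansions[pattern_element]
--         return any(elements_match(test_element, possibility, expansions) for possibility in possibilities)
--     else:
--         return False
-- ===== SOURCE B (Python) =====
-- def elements_match(test_element, pattern_element, expansions):
--     # Iterative DFS with an explicit stack and a visited set instead of recursion.
--     seen = set()
--     stack = [pattern_element]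
--     while stack:
--         e = stack.pop()
--         if e == "_" or e == test_element:
--             return True
--         if e in seen:
--             continue
--         seen.add(e)
--         if e in expansions:
--             stack.extend(expansions[e])
--     return False
-- ===== Notes on version B (the rewrite author's own statement) =====
-- stated objective: alternative
-- what changed: The recursive any()-over-expansions matcher is replaced by an iterative depth-first search with an explicit stack and a visited set: a different traversal that visits each expansion key at most once instead of re-expanding it on every occurrence.
import Mathlib
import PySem

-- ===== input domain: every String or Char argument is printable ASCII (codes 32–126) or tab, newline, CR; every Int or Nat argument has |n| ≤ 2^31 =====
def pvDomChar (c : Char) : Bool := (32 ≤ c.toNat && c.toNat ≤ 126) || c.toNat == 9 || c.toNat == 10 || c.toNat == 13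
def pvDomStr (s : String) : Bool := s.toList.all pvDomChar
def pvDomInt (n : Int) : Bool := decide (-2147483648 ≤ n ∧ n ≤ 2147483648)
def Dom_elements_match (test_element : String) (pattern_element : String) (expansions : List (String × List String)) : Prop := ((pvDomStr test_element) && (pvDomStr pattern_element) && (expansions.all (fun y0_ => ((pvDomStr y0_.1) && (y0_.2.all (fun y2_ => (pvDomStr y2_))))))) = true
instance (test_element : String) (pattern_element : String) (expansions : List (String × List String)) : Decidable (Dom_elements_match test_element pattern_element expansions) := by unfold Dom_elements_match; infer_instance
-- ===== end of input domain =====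

-- B replaces A's recursion by an iterative DFS with an explicit stack and a visited set; where A's
-- recursion never bottoms out (cyclic tables, RecursionError) B terminates — those inputs are
-- outside Pre_, which holds exactly where A returns.

-- ===== PORT A =====
-- first-match lookup on the association list: exactly Python's dict lookup / `in` test
def pvLookup : List (String × List String) → String → Option (List String)
  | [], _ => none
  | kv :: rest, k => if kv.1 == k then some kv.2 else pvLookup rest k

-- literal transliteration of A's recursion; the Nat argument is a totality fuel only
-- (under Pre_ below the computed value is A's value, proved in the lemmas)
def pvRecA (test_element : String) (expansions : List (String × List String)) : Nat → String → Bool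
  | 0, _ => false
  | n+1, pattern_element =>
    if pattern_element == "_" then true
    else if test_element == pattern_element then true
    else match pvLookup expansions pattern_element with
      | some possibilities => possibilities.any (fun possibility => pvRecA test_element expansions n possibility)
      | none => false

def elements_match (test_element : String) (pattern_element : String) (expansions : List (String × List String)) : Bool :=
  pvRecA test_element expansions (expansions.length + 3) pattern_element

-- ===== PORT B =====
-- iterative DFS: pop from the stack top (Python pops from the list end, so pushed possibilities
-- are prepended reversed), skip visited elements, push the possibilities of unvisited keys.
-- The Nat argument is a totality fuel only; the fuel passed below always suffices.
def pvDfs (test_element : String) (expansions : List (String × List String)) : Nat → List String → PySem.Set String → Bool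
  | 0, _, _ => false
  | n+1, stack, seen =>
    match stack with
    | [] => false
    | e :: rest =>
      if e == "_" || e == test_element then true
      else if PySem.Set.contains seen e then pvDfs test_element expansions n rest seen
      else
        match pvLookup expansions e with
        | some ps => pvDfs test_element expansions n (ps.reverse ++ rest) (PySem.Set.add seen e)
        | none => pvDfs test_element expansions n rest (PySem.Set.add seen e)

def elements_match_alt (test_element : String) (pattern_element : String) (expansions : List (String × List String)) : Bool :=
  pvDfs test_element expansions ((expansions.map (fun kv => kv.2.length)).sum + 2) [pattern_element] PySem.Set.empty

-- ===== PRECONDITION & SPEC =====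
-- The definitions of this section are about the input alone and are not used by either port.
-- pvEdges: the possibilities listed for a key of the expansion table (first entry wins).
def pvEdges (expansions : List (String × List String)) (k : String) : Option (List String) :=
  (expansions.find? (fun kv => kv.1 == k)).map Prod.snd

-- pvMatch: the element matches directly (wildcard or equality) — A's two base cases.
def pvMatch (test_element e : String) : Bool := e == "_" || test_element == e

-- Conditions on the expansion graph (none of them is used by either port):
-- pvTF n e — the expansion subtree below e is matchless and bottoms out within depth n;
-- pvChain n e — following, from e, the first possibility whose subtree is not finitely false,
-- a direct match or a finitely-false element is reached within n steps.
-- Pre_ below holds exactly when A's recursion terminates: the leftmost-unresolved expansion chain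
-- from the pattern reaches a direct match or a finitely-false subtree.  Outside Pre_ A never
-- returns a value (it raises RecursionError, while B terminates); no input on which A returns a
-- value is excluded.
def pvTF (test_element : String) (expansions : List (String × List String)) : Nat → String → Bool
  | 0, _ => false
  | n+1, e => !pvMatch test_element e && ((pvEdges expansions e).elim true (fun ps => ps.all (pvTF test_element expansions n)))
def pvChain (test_element : String) (expansions : List (String × List String)) : Nat → String → Bool
  | 0, _ => false
  | n+1, e => pvMatch test_element e || pvTF test_element expansions (expansions.length + 1) e || ((pvEdges expansions e).elim false (fun ps => (ps.find? (fun q => !pvTF test_element expansions (expansions.length + 1) q)).elim false (pvChain test_element expansions n)))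
def Pre_elements_match (test_element : String) (pattern_element : String) (expansions : List (String × List String)) : Prop :=
  pvChain test_element expansions (expansions.length + 2) pattern_element = true
instance (test_element : String) (pattern_element : String) (expansions : List (String × List String)) : Decidable (Pre_elements_match test_element pattern_element expansions) := by unfold Pre_elements_match; infer_instance

def pvWitness_elements_match : String × String × (List (String × List String)) :=
  ("dog", "N", [("N", ["dog", "cat"])])

def Spec_elements_match (test_element : String) (pattern_element : String) (expansions : List (String × List String)) (out : Bool) : Prop := out = elements_match_alt test_element pattern_element expansions
instance (test_element : String) (pattern_element : String) (expansions : List (String × List String)) (out : Bool) : Decidable (Spec_elements_match test_element pattern_element expansions out) := by unfold Spec_elements_match; infer_instance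

-- ===== CLAIM (what is proved, stated in full; the proofs are below) =====
def Claim_equal_elements_match : Prop := ∀ (test_element : String) (pattern_element : String) (expansions : List (String × List String)), Dom_elements_match test_element pattern_element expansions → Pre_elements_match test_element pattern_element expansions → Spec_elements_match test_element pattern_element expansions (elements_match test_element pattern_element expansions)

-- ===== LEMMAS AND PROOFS =====

-- the Pre_-side lookup agrees with the ports' first-match lookup
lemma pvEdges_eq_pvLookup (ex : List (String × List String)) (k : String) :
    pvEdges ex k = pvLookup ex k := by
  induction ex with
  | nil => rfl
  | cons kv rest ih =>
    by_cases hk : kv.1 == k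
    · simp [pvEdges, pvLookup, hk]
    · simp only [pvEdges, pvLookup] at ih ⊢
      simp [hk, ih]

-- semantic truth value of the search: a match is reachable from e through the expansion table
inductive pvReach (t : String) (ex : List (String × List String)) : String → Prop
  | found (e : String) : pvMatch t e = true → pvReach t ex e
  | step (e : String) (ps : List String) (q : String) :
      pvLookup ex e = some ps → q ∈ ps → pvReach t ex q → pvReach t ex e

lemma pvReach_inv {t : String} {ex : List (String × List String)} {e : String}
    (h : pvReach t ex e) (hm : pvMatch t e = false) :
    ∃ ps, pvLookup ex e = some ps ∧ ∃ q ∈ ps, pvReach t ex q := by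
  cases h with
  | found _ h1 => rw [h1] at hm; cases hm
  | step _ ps q hl hq hr => exact ⟨ps, hl, q, hq, hr⟩

-- a finitely-false subtree contains no match
lemma pvTF_not_reach {t : String} {ex : List (String × List String)} {e : String}
    (hr : pvReach t ex e) : ∀ n, ¬ pvTF t ex n e = true := by
  induction hr with
  | found e h1 =>
    intro n htf
    cases n with
    | zero => simp [pvTF] at htf
    | succ n => simp [pvTF, h1] at htf
  | step e ps q hl hq _ ih =>
    intro n htf
    cases n with
    | zero => simp [pvTF] at htf
    | succ n =>
      simp only [pvTF, Bool.and_eq_true, Bool.not_eq_eq_eq_not, Bool.not_true] at htf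
      obtain ⟨_, h2⟩ := htf
      rw [pvEdges_eq_pvLookup, hl] at h2
      exact ih n (List.all_eq_true.mp h2 q hq)

-- on a finitely-false subtree A's recursion returns False, for any fuel above the depth
lemma pvTF_eval {t : String} {ex : List (String × List String)} :
    ∀ (n : Nat) (e : String), pvTF t ex n e = true → ∀ m, n < m → pvRecA t ex m e = false := by
  intro n
  induction n with
  | zero => intro e h; simp [pvTF] at h
  | succ n ih =>
    intro e h m hm
    simp only [pvTF, Bool.and_eq_true, Bool.not_eq_eq_eq_not, Bool.not_true] at h
    obtain ⟨h1, h2⟩ := h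
    rw [pvEdges_eq_pvLookup] at h2
    have hb : ¬ (e == "_") = true := by
      intro hb; simp [pvMatch, hb] at h1
    have ht : ¬ (t == e) = true := by
      intro ht; simp [pvMatch, ht] at h1
    cases m with
    | zero => omega
    | succ m' =>
      simp only [pvRecA, if_neg hb, if_neg ht]
      cases hl : pvLookup ex e with
      | none => rfl
      | some ps =>
        rw [hl] at h2
        simp only [Option.elim] at h2
        simp only [List.any_eq_false]
        intro q hq
        simp [ih q (List.all_eq_true.mp h2 q hq) m' (by omega)]

-- if the chain condition holds at e, then either e's subtree is finitely false, or a match is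
-- reachable from e and A's recursion returns True for any fuel above the chain length
lemma pvChain_sound {t : String} {ex : List (String × List String)} :
    ∀ (n : Nat) (e : String), pvChain t ex n e = true →
      pvTF t ex (ex.length + 1) e = true ∨
        (pvReach t ex e ∧ ∀ m, n < m → pvRecA t ex m e = true) := by
  intro n
  induction n with
  | zero => intro e h; simp [pvChain] at h
  | succ n ih =>
    intro e h
    by_cases htf : pvTF t ex (ex.length + 1) e = true
    · exact Or.inl htf
    · right
      by_cases hmt : pvMatch t e = true
      · refine ⟨pvReach.found e hmt, ?_⟩
        intro m hm
        cases m with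
        | zero => omega
        | succ m' =>
          simp only [pvMatch, Bool.or_eq_true] at hmt
          rcases hmt with hb | htq
          · simp [pvRecA, hb]
          · by_cases hb2 : (e == "_") = true
            · simp [pvRecA, hb2]
            · simp [pvRecA, hb2, htq]
      · simp only [pvChain, Bool.or_eq_true] at h
        rw [pvEdges_eq_pvLookup] at h
        rcases h with (h | h) | h
        · exact absurd h hmt
        · exact absurd h htf
        · cases hl : pvLookup ex e with
          | none => rw [hl] at h; simp at h
          | some ps =>
            rw [hl] at h
            simp only [Option.elim] at h
            cases hf : ps.find? (fun q => !pvTF t ex (ex.length + 1) q) with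
            | none => rw [hf] at h; simp at h
            | some c =>
              rw [hf] at h
              have hc := ih c h
              have hcm : c ∈ ps := List.mem_of_find?_eq_some hf
              have hcnt : ¬ pvTF t ex (ex.length + 1) c = true := by
                have := List.find?_some hf
                simp at this
                simp [this]
              rcases hc with hc | ⟨hcr, hcev⟩
              · exact absurd hc hcnt
              · refine ⟨pvReach.step e ps c hl hcm hcr, ?_⟩
                intro m hm
                cases m with
                | zero => omega
                | succ m' =>
                  have hb : ¬ (e == "_") = true := by
                    intro hb; simp [pvMatch, hb] at hmt
                  have htq : ¬ (t == e) = true := by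
                    intro htq; simp [pvMatch, htq] at hmt
                  simp only [pvRecA, if_neg hb, if_neg htq, hl]
                  exact List.any_eq_true.mpr ⟨c, hcm, hcev m' (by omega)⟩

-- invariant of the DFS: every visited element is a non-match whose possibilities (if it is a key)
-- have all been pushed (they are visited or still on the stack)
def pvInv (t : String) (ex : List (String × List String)) (stack seen : List String) : Prop :=
  ∀ s ∈ seen, pvMatch t s = false ∧
    ∀ ps, pvLookup ex s = some ps → ∀ q ∈ ps, q ∈ seen ∨ q ∈ stack

-- a reaching element that is visited or on the stack yields a reaching element on the stack
lemma pvReachFind {t : String} {ex : List (String × List String)} {e : String}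
    (hr : pvReach t ex e) :
    ∀ (stack seen : List String), pvInv t ex stack seen → (e ∈ stack ∨ e ∈ seen) →
      ∃ e' ∈ stack, pvReach t ex e' := by
  induction hr with
  | found e h1 =>
    intro stack seen hinv hloc
    rcases hloc with hst | hsn
    · exact ⟨e, hst, pvReach.found e h1⟩
    · obtain ⟨hm, _⟩ := hinv e hsn
      rw [h1] at hm; cases hm
  | step e ps q hl hq hr ih =>
    intro stack seen hinv hloc
    rcases hloc with hst | hsn
    · exact ⟨e, hst, pvReach.step e ps q hl hq hr⟩
    · obtain ⟨_, hch⟩ := hinv e hsn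
      rcases hch ps hl q hq with hq1 | hq2
      · exact ih stack seen hinv (Or.inr hq1)
      · exact ih stack seen hinv (Or.inl hq2)

-- potential: total size of the not-yet-visited expansion lists
def pvRem (ex : List (String × List String)) (seen : List String) : Nat :=
  (ex.map (fun kv => if kv.1 ∈ seen then 0 else kv.2.length)).sum

lemma pvRem_antitone {ex : List (String × List String)} {s1 s2 : List String}
    (h : ∀ k, k ∈ s1 → k ∈ s2) : pvRem ex s2 ≤ pvRem ex s1 := by
  induction ex with
  | nil => simp [pvRem]
  | cons kv rest ih =>
    simp only [pvRem, List.map_cons, List.sum_cons] at ih ⊢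
    by_cases h1 : kv.1 ∈ s1
    · have h2 : kv.1 ∈ s2 := h _ h1
      rw [if_pos h1, if_pos h2]
      omega
    · rw [if_neg h1]
      by_cases h2 : kv.1 ∈ s2
      · rw [if_pos h2]; omega
      · rw [if_neg h2]; omega

lemma pvRem_append_le {ex : List (String × List String)} (seen : List String) (e : String) :
    pvRem ex (seen ++ [e]) ≤ pvRem ex seen :=
  pvRem_antitone (fun _ hk => List.mem_append.mpr (Or.inl hk))

lemma pvRem_key {ex : List (String × List String)} {seen : List String} {e : String} {ps : List String}
    (hs : e ∉ seen) (hl : pvLookup ex e = some ps) :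
    pvRem ex (seen ++ [e]) + ps.length ≤ pvRem ex seen := by
  induction ex with
  | nil => simp [pvLookup] at hl
  | cons kv rest ih =>
    by_cases hk : kv.1 == e
    · have hke : kv.1 = e := by simpa using hk
      have hps : kv.2 = ps := by simp [pvLookup, hk] at hl; exact hl
      have hc1 : kv.1 ∈ seen ++ [e] := List.mem_append.mpr (Or.inr (by simp [hke]))
      have hc2 : kv.1 ∉ seen := by rw [hke]; exact hs
      have hmono := pvRem_append_le (ex := rest) seen e
      simp only [pvRem, List.map_cons, List.sum_cons] at hmono ⊢
      rw [if_pos hc1, if_neg hc2, hps]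
      omega
    · have hl' : pvLookup rest e = some ps := by simpa [pvLookup, hk] using hl
      have hke : kv.1 ≠ e := by simpa using hk
      have hiff : (if kv.1 ∈ seen ++ [e] then 0 else kv.2.length)
          = (if kv.1 ∈ seen then 0 else kv.2.length) := by
        by_cases hc : kv.1 ∈ seen
        · rw [if_pos (List.mem_append.mpr (Or.inl hc)), if_pos hc]
        · rw [if_neg (fun hm => by
            rcases List.mem_append.mp hm with hx | hx
            · exact hc hx
            · exact hke (by simpa using hx)), if_neg hc]
      have := ih hl'
      simp only [pvRem, List.map_cons, List.sum_cons] at this ⊢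
      rw [hiff]
      omega

lemma set_contains_iff (s : List String) (e : String) :
    PySem.Set.contains s e = true ↔ e ∈ s := by
  simp [PySem.Set.contains]

lemma set_add_of_not_contains {s : List String} {e : String}
    (h : PySem.Set.contains s e = false) : PySem.Set.add s e = s ++ [e] := by
  have hm : e ∉ s := by
    intro hmem
    rw [(set_contains_iff s e).mpr hmem] at h
    simp at h
  simp [PySem.Set.add, hm]

-- soundness of the DFS: it only answers true when a match is reachable from a stack element
lemma pvDfs_sound {t : String} {ex : List (String × List String)} :
    ∀ (n : Nat) (stack : List String) (seen : PySem.Set String), pvDfs t ex n stack seen = true →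
      ∃ e ∈ stack, pvReach t ex e := by
  intro n
  induction n with
  | zero => intro stack seen h; simp [pvDfs] at h
  | succ n ih =>
    intro stack seen h
    cases stack with
    | nil => simp [pvDfs] at h
    | cons e rest =>
      simp only [pvDfs] at h
      by_cases hm : (e == "_" || e == t) = true
      · refine ⟨e, by simp, pvReach.found e ?_⟩
        simp only [Bool.or_eq_true, beq_iff_eq] at hm
        rcases hm with hm | hm
        · simp [pvMatch, hm]
        · simp [pvMatch, hm]
      · rw [if_neg (by simp [hm])] at h
        by_cases hs : PySem.Set.contains seen e = true
        · rw [if_pos hs] at h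
          obtain ⟨e', he', hg'⟩ := ih rest seen h
          exact ⟨e', List.mem_cons_of_mem _ he', hg'⟩
        · rw [if_neg hs] at h
          cases hl : pvLookup ex e with
          | some ps =>
            rw [hl] at h
            obtain ⟨e', he', hg'⟩ := ih _ _ h
            rcases List.mem_append.mp he' with hrev | hr
            · exact ⟨e, by simp, pvReach.step e ps e' hl (List.mem_reverse.mp hrev) hg'⟩
            · exact ⟨e', List.mem_cons_of_mem _ hr, hg'⟩
          | none =>
            rw [hl] at h
            obtain ⟨e', he', hg'⟩ := ih _ _ h
            exact ⟨e', List.mem_cons_of_mem _ he', hg'⟩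

-- completeness of the DFS: with enough fuel, a reaching element on the stack is found
lemma pvDfs_complete {t : String} {ex : List (String × List String)} :
    ∀ (n : Nat) (stack seen : List String), stack.length + pvRem ex seen < n →
      pvInv t ex stack seen → (∃ e ∈ stack, pvReach t ex e) →
      pvDfs t ex n stack seen = true := by
  intro n
  induction n with
  | zero => intro stack seen h; omega
  | succ n ih =>
    intro stack seen hfuel hinv hex
    cases stack with
    | nil => obtain ⟨e, he, _⟩ := hex; simp at he
    | cons e rest =>
      simp only [pvDfs]
      by_cases hm : (e == "_" || e == t) = true
      · simp [hm]
      · rw [if_neg (by simp [hm])]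
        have hme : pvMatch t e = false := by
          simp only [Bool.or_eq_true, beq_iff_eq] at hm
          push Not at hm
          simp only [pvMatch, Bool.or_eq_false_iff]
          refine ⟨by simpa using hm.1, ?_⟩
          simpa using fun h : t = e => hm.2 h.symm
        by_cases hs : PySem.Set.contains seen e = true
        · rw [if_pos hs]
          have hes : e ∈ seen := (set_contains_iff seen e).mp hs
          have hinv' : pvInv t ex rest seen := by
            intro s hsm
            obtain ⟨h1, h3⟩ := hinv s hsm
            refine ⟨h1, fun ps hps q hq => ?_⟩
            rcases h3 ps hps q hq with hq1 | hq2
            · exact Or.inl hq1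
            · rcases List.mem_cons.mp hq2 with rfl | hq3
              · exact Or.inl hes
              · exact Or.inr hq3
          obtain ⟨e', he', hg'⟩ := hex
          have hex' : ∃ e'' ∈ rest, pvReach t ex e'' := by
            rcases List.mem_cons.mp he' with rfl | hr
            · exact pvReachFind hg' rest seen hinv' (Or.inr hes)
            · exact ⟨e', hr, hg'⟩
          exact ih rest seen (by simp at hfuel ⊢; omega) hinv' hex'
        · rw [if_neg hs]
          have hsf : PySem.Set.contains seen e = false := by simpa using hs
          have hscf : e ∉ seen := by
            intro hmem
            rw [(set_contains_iff seen e).mpr hmem] at hsf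
            simp at hsf
          have hadd : PySem.Set.add seen e = seen ++ [e] := set_add_of_not_contains hsf
          cases hl : pvLookup ex e with
          | some ps =>
            rw [hadd]
            have hinv' : pvInv t ex (ps.reverse ++ rest) (seen ++ [e]) := by
              intro s hsm
              rcases List.mem_append.mp hsm with hold | hnew
              · obtain ⟨h1, h3⟩ := hinv s hold
                refine ⟨h1, fun ps' hps' q hq => ?_⟩
                rcases h3 ps' hps' q hq with hq1 | hq2
                · exact Or.inl (List.mem_append.mpr (Or.inl hq1))
                · rcases List.mem_cons.mp hq2 with rfl | hq3
                  · exact Or.inl (List.mem_append.mpr (Or.inr (by simp)))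
                  · exact Or.inr (List.mem_append.mpr (Or.inr hq3))
              · have hse : s = e := by simpa using hnew
                subst hse
                refine ⟨hme, fun ps' hps' q hq => ?_⟩
                rw [hl] at hps'
                obtain rfl : ps = ps' := by injection hps'
                exact Or.inr (List.mem_append.mpr (Or.inl (List.mem_reverse.mpr hq)))
            have hex' : ∃ e'' ∈ ps.reverse ++ rest, pvReach t ex e'' := by
              obtain ⟨e', he', hg'⟩ := hex
              rcases List.mem_cons.mp he' with rfl | hr
              · obtain ⟨ps', hps', q, hq, hqr⟩ := pvReach_inv hg' hme
                rw [hl] at hps'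
                obtain rfl : ps = ps' := by injection hps'
                exact ⟨q, List.mem_append.mpr (Or.inl (List.mem_reverse.mpr hq)), hqr⟩
              · exact ⟨e', List.mem_append.mpr (Or.inr hr), hg'⟩
            refine ih (ps.reverse ++ rest) (seen ++ [e]) ?_ hinv' hex'
            have hkey := pvRem_key hscf hl
            simp only [List.length_append, List.length_reverse, List.length_cons] at hfuel ⊢
            omega
          | none =>
            rw [hadd]
            have hinv' : pvInv t ex rest (seen ++ [e]) := by
              intro s hsm
              rcases List.mem_append.mp hsm with hold | hnew
              · obtain ⟨h1, h3⟩ := hinv s hold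
                refine ⟨h1, fun ps' hps' q hq => ?_⟩
                rcases h3 ps' hps' q hq with hq1 | hq2
                · exact Or.inl (List.mem_append.mpr (Or.inl hq1))
                · rcases List.mem_cons.mp hq2 with rfl | hq3
                  · exact Or.inl (List.mem_append.mpr (Or.inr (by simp)))
                  · exact Or.inr hq3
              · have hse : s = e := by simpa using hnew
                subst hse
                refine ⟨hme, fun ps' hps' => ?_⟩
                rw [hl] at hps'; cases hps'
            have hex' : ∃ e'' ∈ rest, pvReach t ex e'' := by
              obtain ⟨e', he', hg'⟩ := hex
              rcases List.mem_cons.mp he' with rfl | hr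
              · obtain ⟨ps', hps', _⟩ := pvReach_inv hg' hme
                rw [hl] at hps'; cases hps'
              · exact ⟨e', hr, hg'⟩
            refine ih rest (seen ++ [e]) ?_ hinv' hex'
            have := pvRem_append_le (ex := ex) seen e
            simp only [List.length_cons] at hfuel
            omega

lemma pvRem_nil (ex : List (String × List String)) :
    pvRem ex [] = (ex.map (fun kv => kv.2.length)).sum := by
  simp [pvRem]

-- B's value is exactly reachability of a match from the pattern
lemma pvAlt_iff {t p : String} {ex : List (String × List String)} :
    elements_match_alt t p ex = true ↔ pvReach t ex p := by
  constructor
  · intro h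
    obtain ⟨e, he, hr⟩ := pvDfs_sound _ _ _ h
    have : e = p := by simpa using he
    exact this ▸ hr
  · intro hr
    unfold elements_match_alt
    refine pvDfs_complete _ [p] PySem.Set.empty ?_ ?_ ⟨p, by simp, hr⟩
    · have : pvRem ex (PySem.Set.empty) = (ex.map (fun kv => kv.2.length)).sum := pvRem_nil ex
      simp only [List.length_cons, List.length_nil, this]
      omega
    · intro s hsm; simp [PySem.Set.empty] at hsm

-- ===== VERDICT (by name: the statements are the Claim_ definitions above) =====
theorem elements_match_spec : Claim_equal_elements_match := by
  intro t p ex _ hpre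
  unfold Spec_elements_match
  rcases pvChain_sound _ p hpre with htf | ⟨hr, hev⟩
  · have hA : elements_match t p ex = false :=
      pvTF_eval _ p htf (ex.length + 3) (by omega)
    rw [hA]
    cases hB : elements_match_alt t p ex with
    | false => rfl
    | true => exact absurd (pvAlt_iff.mp hB) (fun h => pvTF_not_reach h _ htf)
  · have hA : elements_match t p ex = true := hev (ex.length + 3) (by omega)
    rw [hA, (pvAlt_iff.mpr hr)]
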